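-- pv_equiv track=rewrite | github.com/Lj-github/pythonTool | easyGameTool/foreignTools/tools/pythonReadJS/MD5Handle.py | checkResFileNoMD5
-- ===== SOURCE A (Python) =====
-- noMD5Files = ({'type': "file", 'url': "images/login/clickRefresh.png"}, {'type': "dir", 'url': "images/sdk/"},{'type':"file", 'url':"images/dtl_dddt.jpg"})
--
-- def checkResFileNoMD5(url):
--     for obj in noMD5Files:
--         if obj["type"] == "file":
--             if obj["url"] == url:
--                 return True
--         elif obj["type"] == "dir":
--             index = url.rfind("/")
--             dirPath = url[:(index+1)]
--             if obj["url"] == dirPath: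
--                 return True
-- ===== SOURCE B (Python) =====
-- noMD5Files = ({'type': "file", 'url': "images/login/clickRefresh.png"}, {'type': "dir", 'url': "images/sdk/"},{'type':"file", 'url':"images/dtl_dddt.jpg"})
--
-- # Precomputed lookup tables: one direct membership check per kind instead of a type-branching scan.
-- _fileUrls = {obj['url'] for obj in noMD5Files if obj['type'] == "file"}
-- _dirUrls = {obj['url'] for obj in noMD5Files if obj['type'] == "dir"}
--
-- def checkResFileNoMD5(url):
--     if url in _fileUrls:
--         return True
--     dirPath = url[:url.rfind("/") + 1]
--     if dirPath in _dirUrls: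
--         return True
-- ===== Notes on version B (the rewrite author's own statement) =====
-- stated objective: simpler
-- what changed: Replaced the per-element type-branching scan over the tuple of dicts by two precomputed url sets (files and dirs) consulted with one membership test each.
import Mathlib
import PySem

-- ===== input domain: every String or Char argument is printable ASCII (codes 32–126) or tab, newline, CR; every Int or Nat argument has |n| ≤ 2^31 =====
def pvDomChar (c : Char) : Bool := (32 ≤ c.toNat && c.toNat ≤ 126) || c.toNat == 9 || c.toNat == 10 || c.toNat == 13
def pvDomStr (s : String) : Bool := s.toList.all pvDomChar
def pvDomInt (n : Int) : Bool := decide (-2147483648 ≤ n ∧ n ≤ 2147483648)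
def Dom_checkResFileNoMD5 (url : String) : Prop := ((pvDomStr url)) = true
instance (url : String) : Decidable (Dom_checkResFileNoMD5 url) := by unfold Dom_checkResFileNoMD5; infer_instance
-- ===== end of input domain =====

-- B replaces A's type-branching scan over the dict tuple by two precomputed url sets
-- (file urls / dir urls) consulted with one membership test each (objective: simpler).

-- ===== PORT A =====
-- the module constant noMD5Files: a tuple of dicts
def pvNoMD5Files : List (PySem.Dict String String) :=
  [ PySem.Dict.ofList [("type", "file"), ("url", "images/login/clickRefresh.png")]
  , PySem.Dict.ofList [("type", "dir"),  ("url", "images/sdk/")]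
  , PySem.Dict.ofList [("type", "file"), ("url", "images/dtl_dddt.jpg")] ]

-- the for-loop; obj["type"]/obj["url"] ported as getD _ "" — exact here, the keys are always present
def pvCheckLoop (url : String) : List (PySem.Dict String String) → Option Bool
  | [] => none
  | obj :: rest =>
    if PySem.Dict.getD obj "type" "" = "file" then
      if PySem.Dict.getD obj "url" "" = url then some true else pvCheckLoop url rest
    else if PySem.Dict.getD obj "type" "" = "dir" then
      let index := PySem.Str.rfind url "/"
      let dirPath := PySem.Str.slice url none (some (index + 1))
      if PySem.Dict.getD obj "url" "" = dirPath then some true else pvCheckLoop url rest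
    else pvCheckLoop url rest

def checkResFileNoMD5 (url : String) : Option Bool := pvCheckLoop url pvNoMD5Files

-- ===== PORT B =====
-- the precomputed sets (PySem.Set = distinct-element list)
def pvFileUrls : List String := PySem.Set.ofList ["images/login/clickRefresh.png", "images/dtl_dddt.jpg"]
def pvDirUrls : List String := PySem.Set.ofList ["images/sdk/"]

def checkResFileNoMD5_alt (url : String) : Option Bool :=
  if pvFileUrls.contains url then some true
  else
    let dirPath := PySem.Str.slice url none (some (PySem.Str.rfind url "/" + 1))
    if pvDirUrls.contains dirPath then some true else none

-- ===== PRECONDITION & SPEC =====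
def Spec_checkResFileNoMD5 (url : String) (out : Option Bool) : Prop := out = checkResFileNoMD5_alt url
instance (url : String) (out : Option Bool) : Decidable (Spec_checkResFileNoMD5 url out) := by unfold Spec_checkResFileNoMD5; infer_instance

-- ===== CLAIM (what is proved, stated in full; the proofs are below) =====
def Claim_equal_checkResFileNoMD5 : Prop := ∀ (url : String), Dom_checkResFileNoMD5 url → Spec_checkResFileNoMD5 url (checkResFileNoMD5 url)

-- ===== LEMMAS AND PROOFS =====

-- ===== VERDICT (by name: the statement is the Claim_ definition above) =====
set_option maxRecDepth 20000 in
theorem checkResFileNoMD5_spec : Claim_equal_checkResFileNoMD5 := by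
  intro url _
  show checkResFileNoMD5 url = checkResFileNoMD5_alt url
  by_cases h1 : url = "images/login/clickRefresh.png"
  · subst h1; rfl
  by_cases h2 : url = "images/dtl_dddt.jpg"
  · subst h2; rfl
  unfold checkResFileNoMD5 checkResFileNoMD5_alt pvNoMD5Files pvFileUrls pvDirUrls
  simp only [pvCheckLoop]
  have e1 : PySem.Dict.getD (PySem.Dict.ofList [("type", "file"), ("url", "images/login/clickRefresh.png")]) "type" "" = "file" := rfl
  have e2 : PySem.Dict.getD (PySem.Dict.ofList [("type", "file"), ("url", "images/login/clickRefresh.png")]) "url" "" = "images/login/clickRefresh.png" := rfl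
  have e3 : PySem.Dict.getD (PySem.Dict.ofList [("type", "dir"), ("url", "images/sdk/")]) "type" "" = "dir" := rfl
  have e4 : PySem.Dict.getD (PySem.Dict.ofList [("type", "dir"), ("url", "images/sdk/")]) "url" "" = "images/sdk/" := rfl
  have e5 : PySem.Dict.getD (PySem.Dict.ofList [("type", "file"), ("url", "images/dtl_dddt.jpg")]) "type" "" = "file" := rfl
  have e6 : PySem.Dict.getD (PySem.Dict.ofList [("type", "file"), ("url", "images/dtl_dddt.jpg")]) "url" "" = "images/dtl_dddt.jpg" := rfl
  rw [e1, e2, e3, e4, e5, e6]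
  clear e1 e2 e3 e4 e5 e6
  by_cases h3 : ("images/sdk/" : String) = PySem.Str.slice url none (some (PySem.Chars.rfind url.toList ['/'] + 1))
  · simp [PySem.Set.ofList, Ne.symm h1, h3.symm]
  · have h3' : ¬ PySem.Str.slice url none (some (PySem.Chars.rfind url.toList ['/'] + 1)) = "images/sdk/" :=
      fun h => h3 h.symm
    simp [PySem.Set.ofList, Ne.symm h1, Ne.symm h2, h3, h3']
    exact ⟨h1, h2⟩
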